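-- pv_equiv track=rewrite | github.com/VinhTungg/PTIT_PYTHON | PY01024 - CHẴN - LẺ.py | solve
-- ===== SOURCE A (Python) =====
-- def solve(n):
--     sum = 0
--     while(n > 9):
--         du = n % 10
--         sum += du
--         n //= 10
--         if(abs(du - n % 10) != 2): return "NO"
--     sum += n
--     if(sum % 10 == 0): return "YES"
--     return "NO"
-- ===== SOURCE B (Python) =====
-- def digits(n):
--     # most-significant-first digit list (for n <= 9, just [n])
--     return [n] if n <= 9 else digits(n // 10) + [n % 10]
--
-- def solve(n):
--     ds = digits(n)
--     if all(abs(a - b) == 2 for a, b in zip(ds, ds[1:])) and sum(ds) % 10 == 0: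
--         return "YES"
--     return "NO"
-- ===== Notes on version B (the rewrite author's own statement) =====
-- stated objective: simpler
-- what changed: A fuses digit extraction, the adjacent-difference early-exit check and the running sum into one destructive while loop; B materializes the digit list by structural recursion and then runs two independent declarative checks (all over zip-pairs, sum % 10) with no early exit or mutable state.
import Mathlib
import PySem

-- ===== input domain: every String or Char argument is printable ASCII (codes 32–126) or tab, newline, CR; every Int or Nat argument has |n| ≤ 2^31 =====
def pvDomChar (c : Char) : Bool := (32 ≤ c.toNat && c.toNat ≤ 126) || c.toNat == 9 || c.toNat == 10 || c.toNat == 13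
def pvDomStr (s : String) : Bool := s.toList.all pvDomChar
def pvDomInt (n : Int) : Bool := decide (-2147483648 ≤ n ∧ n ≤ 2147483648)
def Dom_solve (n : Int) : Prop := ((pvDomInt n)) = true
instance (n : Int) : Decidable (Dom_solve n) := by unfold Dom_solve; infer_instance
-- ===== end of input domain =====

-- B replaces A's fused destructive while-loop (early-exit adjacency check + running sum)
-- by a recursively materialized digit list scanned twice; objective: simpler, not faster.

-- ===== PORT A =====
-- the while loop of A, with the mutable state (n, sum) as parameters; early `return "NO"` kept
def solveLoop (n : Int) (s : Int) : String :=
  if _h : n > 9 then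
    let du := PySem.Int.mod n 10
    let s' := s + du
    let n' := PySem.Int.floordiv n 10
    if |du - PySem.Int.mod n' 10| ≠ 2 then "NO"
    else solveLoop n' s'
  else
    -- after the loop: sum += n; if sum % 10 == 0 …
    if PySem.Int.mod (s + n) 10 = 0 then "YES" else "NO"
termination_by n.toNat
decreasing_by
  rw [PySem.Int.floordiv_eq_ediv_of_pos (by omega : (0:Int) < 10)]
  omega

def solve (n : Int) : String := solveLoop n 0

-- ===== PORT B =====
-- digits(n): most-significant-first digit list, [n] for n <= 9
def digitsB (n : Int) : List Int :=
  if n ≤ 9 then [n]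
  else digitsB (PySem.Int.floordiv n 10) ++ [PySem.Int.mod n 10]
termination_by n.toNat
decreasing_by
  rw [PySem.Int.floordiv_eq_ediv_of_pos (by omega : (0:Int) < 10)]
  omega

-- all(abs(a - b) == 2 for a, b in zip(ds, ds[1:]))   (ds[1:] = ds.tail, exact: drop 1)
def adjOK (ds : List Int) : Bool := (ds.zip ds.tail).all (fun p => |p.1 - p.2| == 2)

def solve_alt (n : Int) : String :=
  let ds := digitsB n
  if adjOK ds && (PySem.Int.mod ds.sum 10 == 0) then "YES" else "NO"

-- ===== PRECONDITION & SPEC =====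
def Spec_solve (n : Int) (out : String) : Prop := out = solve_alt n
instance (n : Int) (out : String) : Decidable (Spec_solve n out) := by unfold Spec_solve; infer_instance

-- ===== CLAIM (what is proved, stated in full; the proofs are below) =====
def Claim_equal_solve : Prop := ∀ (n : Int), Dom_solve n → Spec_solve n (solve n)

-- ===== LEMMAS AND PROOFS =====

lemma getLast?_digitsB (n : Int) (h : 1 ≤ n) :
    (digitsB n).getLast? = some (PySem.Int.mod n 10) := by
  rw [digitsB]
  split_ifs with h9
  · have hm : PySem.Int.mod n 10 = n % 10 := PySem.Int.mod_eq_emod_of_pos (by omega)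
    rw [hm]
    simp
    omega
  · exact List.getLast?_concat

lemma adjOK_cons_cons (a b : Int) (t : List Int) :
    adjOK (a :: b :: t) = ((|a - b| == 2) && adjOK (b :: t)) := by
  simp [adjOK]

lemma adjOK_append : ∀ (ys : List Int) (d l : Int), ys.getLast? = some l →
    adjOK (ys ++ [d]) = (adjOK ys && (|l - d| == 2))
  | [], d, l, h => by simp at h
  | [a], d, l, h => by
      simp at h
      subst h
      simp [adjOK]
  | a :: b :: t, d, l, h => by
      have h' : (b :: t).getLast? = some l := by
        simpa [List.getLast?_cons_cons] using h
      have ih := adjOK_append (b :: t) d l h'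
      calc adjOK (a :: b :: t ++ [d])
          = ((|a - b| == 2) && adjOK (b :: t ++ [d])) := adjOK_cons_cons a b (t ++ [d])
        _ = ((|a - b| == 2) && (adjOK (b :: t) && (|l - d| == 2))) := by rw [ih]
        _ = (adjOK (a :: b :: t) && (|l - d| == 2)) := by
              rw [adjOK_cons_cons, Bool.and_assoc]

theorem solveLoop_eq (n s : Int) :
    solveLoop n s =
      if adjOK (digitsB n) && (PySem.Int.mod (s + (digitsB n).sum) 10 == 0)
      then "YES" else "NO" := by
  rw [solveLoop]
  by_cases h : n > 9
  · rw [dif_pos h]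
    show (if |PySem.Int.mod n 10 - PySem.Int.mod (PySem.Int.floordiv n 10) 10| ≠ 2 then "NO"
          else solveLoop (PySem.Int.floordiv n 10) (s + PySem.Int.mod n 10)) = _
    set du := PySem.Int.mod n 10 with hdu
    set n' := PySem.Int.floordiv n 10 with hn'def
    have hn' : (1:Int) ≤ n' := by
      rw [hn'def, PySem.Int.floordiv_eq_ediv_of_pos (by omega : (0:Int) < 10)]
      omega
    have hd : digitsB n = digitsB n' ++ [du] := by
      rw [digitsB, if_neg (by omega : ¬ n ≤ 9)]
    rw [hd, adjOK_append _ _ _ (getLast?_digitsB n' hn')]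
    by_cases hc : |du - PySem.Int.mod n' 10| ≠ 2
    · rw [if_pos hc]
      have hb : (|PySem.Int.mod n' 10 - du| == 2) = false := by
        rw [abs_sub_comm] at hc
        simpa using hc
      rw [hb, Bool.and_false, Bool.false_and, if_neg (by simp)]
    · rw [if_neg hc]
      have ih := solveLoop_eq n' (s + du)
      rw [ih]
      have h2 : (|PySem.Int.mod n' 10 - du| == 2) = true := by
        rw [abs_sub_comm] at hc
        simpa using not_not.mp hc
      rw [h2, Bool.and_true, List.sum_append]
      have hsum : s + du + (digitsB n').sum = s + ((digitsB n').sum + [du].sum) := by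
        simp
        ring
      rw [hsum]
  · rw [dif_neg h]
    have hd : digitsB n = [n] := by
      rw [digitsB, if_pos (by omega : n ≤ 9)]
    rw [hd]
    rcases eq_or_ne (PySem.Int.mod (s + n) 10) 0 with hm | hm
    · rw [if_pos hm]
      simp [adjOK]
      exact (PySem.Int.mod_eq_zero_iff_dvd _ _).mp hm
    · rw [if_neg hm]
      simp [adjOK]
      exact fun hdvd => hm ((PySem.Int.mod_eq_zero_iff_dvd _ _).mpr hdvd)
termination_by n.toNat
decreasing_by
  rw [PySem.Int.floordiv_eq_ediv_of_pos (by omega : (0:Int) < 10)]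
  omega

-- ===== VERDICT (by name: the statement is the Claim_ definition above) =====
theorem solve_spec : Claim_equal_solve := by
  intro n _
  show solve n = solve_alt n
  rw [solve, solveLoop_eq, solve_alt]
  simp
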